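-- pv_equiv track=rewrite | github.com/SHanmapur/python | python_basket_solution.py | per_fruit_data
-- ===== SOURCE A (Python) =====
-- import csv, sys, operator
--
-- def per_fruit_data(fruits_data, size_data, color_data, shape_data, days_data, color_shape, unique_fruits_list):
--     # method to convert fruit data to dict and return dict value
--     fruit_count = {}
--     fruit_color = {}
--     fruit_shape = {}
--     fruit_days = {}
--     fruit_char = {}
--
--     for fruit in unique_fruits_list:
--
--         total_fruit = 0
--         color = []
--         shape = []
--         days = []
--         characteristics = []
--         for i in range(len(fruits_data)):
--
--             if fruit == fruits_data[i]:
--                 total_fruit = total_fruit + size_data[i]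
--                 color.append(color_data[i])
--                 shape.append(shape_data[i])
--                 days.append(days_data[i])
--                 characteristics.append(color_shape[i])
--
--         fruit_count[fruit] = total_fruit
--         fruit_color[fruit] = color
--         fruit_shape[fruit] = shape
--         fruit_days[fruit] = days
--         fruit_char[fruit] = color_shape
--
--     fruit_count = dict(sorted(fruit_count.items(), key=operator.itemgetter(1), reverse=True))
--
--     return fruit_count, fruit_color, fruit_shape, fruit_days, fruit_char
-- ===== SOURCE B (Python) =====
-- def per_fruit_data(fruits_data, size_data, color_data, shape_data, days_data, color_shape, unique_fruits_list):
--     # Single pass: group the rows by fruit once, then emit per unique fruit.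
--     sums = {}
--     colors = {}
--     shapes = {}
--     day_lists = {}
--     for f, s, c, sh, d in zip(fruits_data, size_data, color_data, shape_data, days_data):
--         sums[f] = sums.get(f, 0) + s
--         colors.setdefault(f, []).append(c)
--         shapes.setdefault(f, []).append(sh)
--         day_lists.setdefault(f, []).append(d)
--
--     fruit_count = {f: sums.get(f, 0) for f in unique_fruits_list}
--     fruit_color = {f: colors.get(f, []) for f in unique_fruits_list}
--     fruit_shape = {f: shapes.get(f, []) for f in unique_fruits_list}
--     fruit_days = {f: day_lists.get(f, []) for f in unique_fruits_list}
--     fruit_char = {f: color_shape for f in unique_fruits_list}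
--
--     fruit_count = dict(sorted(fruit_count.items(), key=lambda kv: kv[1], reverse=True))
--     return fruit_count, fruit_color, fruit_shape, fruit_days, fruit_char
-- ===== Notes on version B (the rewrite author's own statement) =====
-- stated objective: faster
-- what changed: A rescans the whole row table once per unique fruit (U nested passes); B makes a single pass over the zipped rows building grouping dicts (sum, colors, shapes, days) keyed by fruit and then emits the per-fruit results by O(1) lookups in unique-list order.
import Mathlib
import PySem

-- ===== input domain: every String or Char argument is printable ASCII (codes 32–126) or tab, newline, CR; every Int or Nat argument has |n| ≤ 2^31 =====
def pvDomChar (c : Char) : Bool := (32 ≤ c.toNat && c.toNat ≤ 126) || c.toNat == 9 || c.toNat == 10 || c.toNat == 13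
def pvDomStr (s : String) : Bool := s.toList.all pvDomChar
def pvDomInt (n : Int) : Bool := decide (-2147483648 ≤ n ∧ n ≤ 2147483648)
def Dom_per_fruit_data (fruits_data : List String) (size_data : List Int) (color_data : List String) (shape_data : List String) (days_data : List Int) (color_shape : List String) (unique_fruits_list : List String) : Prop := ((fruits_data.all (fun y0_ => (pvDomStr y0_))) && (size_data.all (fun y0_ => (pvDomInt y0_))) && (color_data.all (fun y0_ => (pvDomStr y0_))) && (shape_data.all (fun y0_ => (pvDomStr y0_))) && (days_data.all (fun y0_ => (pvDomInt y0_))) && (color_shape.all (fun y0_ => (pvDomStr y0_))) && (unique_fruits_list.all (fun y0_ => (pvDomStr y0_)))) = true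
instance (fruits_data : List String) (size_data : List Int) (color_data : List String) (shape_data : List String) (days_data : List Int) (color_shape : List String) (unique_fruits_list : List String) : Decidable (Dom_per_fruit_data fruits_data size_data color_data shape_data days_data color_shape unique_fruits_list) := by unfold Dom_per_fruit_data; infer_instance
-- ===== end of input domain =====

-- B replaces A's per-fruit rescans of the whole table by ONE grouping pass over the zipped rows
-- plus O(1) lookups per unique fruit (objective: faster). Equivalence is about the RETURN value.

-- ===== PORT A =====
-- A's inner scan for one fruit: walk every index of fruits_data gathering
-- (total, colors, shapes, days, characteristics).  PySem.List.pyGetD is exact here under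
-- Pre_per_fruit_data: every index Python actually reads is then in range; where Python would
-- raise IndexError the input is outside Pre_per_fruit_data.
def pvAGather (fruits_data : List String) (size_data : List Int) (color_data : List String) (shape_data : List String) (days_data : List Int) (color_shape : List String) (fruit : String) : Int × List String × List String × List Int × List String :=
  (PySem.List.pyRange 0 (PySem.List.len fruits_data)).foldl
    (fun acc i =>
      if fruit == PySem.List.pyGetD fruits_data i "" then
        (acc.1 + PySem.List.pyGetD size_data i 0,
         acc.2.1 ++ [PySem.List.pyGetD color_data i ""],
         acc.2.2.1 ++ [PySem.List.pyGetD shape_data i ""],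
         acc.2.2.2.1 ++ [PySem.List.pyGetD days_data i 0],
         acc.2.2.2.2 ++ [PySem.List.pyGetD color_shape i ""])
      else acc)
    (0, [], [], [], [])

def per_fruit_data (fruits_data : List String) (size_data : List Int) (color_data : List String) (shape_data : List String) (days_data : List Int) (color_shape : List String) (unique_fruits_list : List String) : (List (String × Int)) × (List (String × List String)) × (List (String × List String)) × (List (String × List Int)) × (List (String × List String)) :=
  -- the five dicts fruit_count / fruit_color / fruit_shape / fruit_days / fruit_char,
  -- filled fruit by fruit (note: A assigns the WHOLE color_shape list to fruit_char[fruit])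
  let st := unique_fruits_list.foldl
    (fun (st : PySem.Dict String Int × PySem.Dict String (List String) × PySem.Dict String (List String) × PySem.Dict String (List Int) × PySem.Dict String (List String)) fruit =>
      (st.1.insert fruit (pvAGather fruits_data size_data color_data shape_data days_data color_shape fruit).1,
       st.2.1.insert fruit (pvAGather fruits_data size_data color_data shape_data days_data color_shape fruit).2.1,
       st.2.2.1.insert fruit (pvAGather fruits_data size_data color_data shape_data days_data color_shape fruit).2.2.1,
       st.2.2.2.1.insert fruit (pvAGather fruits_data size_data color_data shape_data days_data color_shape fruit).2.2.2.1,
       st.2.2.2.2.insert fruit color_shape))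
    (PySem.Dict.empty, PySem.Dict.empty, PySem.Dict.empty, PySem.Dict.empty, PySem.Dict.empty)
  -- fruit_count = dict(sorted(fruit_count.items(), key=operator.itemgetter(1), reverse=True))
  let fruit_count := PySem.Dict.ofList (PySem.List.sorted st.1.items (fun p => p.2) true)
  (fruit_count.items, st.2.1.items, st.2.2.1.items, st.2.2.2.1.items, st.2.2.2.2.items)

-- ===== PORT B =====
-- 'd.setdefault(k, []).append(v)' ≡ d[k] = d.get(k, []) + [v] ≡ PySem.Dict.modify k [] (· ++ [v]);
-- 'sums[f] = sums.get(f, 0) + s' is PySem.Dict.modify f 0 (· + s).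
def per_fruit_data_alt (fruits_data : List String) (size_data : List Int) (color_data : List String) (shape_data : List String) (days_data : List Int) (color_shape : List String) (unique_fruits_list : List String) : (List (String × Int)) × (List (String × List String)) × (List (String × List String)) × (List (String × List Int)) × (List (String × List String)) :=
  let rows := fruits_data.zip (size_data.zip (color_data.zip (shape_data.zip days_data)))
  let g := rows.foldl
    (fun (g : PySem.Dict String Int × PySem.Dict String (List String) × PySem.Dict String (List String) × PySem.Dict String (List Int)) r =>
      (g.1.modify r.1 0 (· + r.2.1),
       g.2.1.modify r.1 [] (· ++ [r.2.2.1]),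
       g.2.2.1.modify r.1 [] (· ++ [r.2.2.2.1]),
       g.2.2.2.modify r.1 [] (· ++ [r.2.2.2.2])))
    (PySem.Dict.empty, PySem.Dict.empty, PySem.Dict.empty, PySem.Dict.empty)
  let fruit_count := unique_fruits_list.foldl (fun d f => d.insert f (g.1.getD f 0)) PySem.Dict.empty
  let fruit_color := unique_fruits_list.foldl (fun d f => d.insert f (g.2.1.getD f [])) PySem.Dict.empty
  let fruit_shape := unique_fruits_list.foldl (fun d f => d.insert f (g.2.2.1.getD f [])) PySem.Dict.empty
  let fruit_days := unique_fruits_list.foldl (fun d f => d.insert f (g.2.2.2.getD f [])) PySem.Dict.empty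
  let fruit_char := unique_fruits_list.foldl (fun d f => d.insert f color_shape) PySem.Dict.empty
  let fruit_count2 := PySem.Dict.ofList (PySem.List.sorted fruit_count.items (fun p => p.2) true)
  (fruit_count2.items, fruit_color.items, fruit_shape.items, fruit_days.items, fruit_char.items)

-- ===== PRECONDITION & SPEC =====
-- Pre_ excludes exactly the inputs on which Python A raises IndexError: some index i whose
-- fruit lies in unique_fruits_list is out of range for one of the five parallel data lists.
def Pre_per_fruit_data (fruits_data : List String) (size_data : List Int) (color_data : List String) (shape_data : List String) (days_data : List Int) (color_shape : List String) (unique_fruits_list : List String) : Prop :=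
  ∀ i : Nat, i < fruits_data.length → fruits_data.getD i "" ∈ unique_fruits_list →
    (i < size_data.length ∧ i < color_data.length ∧ i < shape_data.length ∧ i < days_data.length ∧ i < color_shape.length)
instance (fruits_data : List String) (size_data : List Int) (color_data : List String) (shape_data : List String) (days_data : List Int) (color_shape : List String) (unique_fruits_list : List String) : Decidable (Pre_per_fruit_data fruits_data size_data color_data shape_data days_data color_shape unique_fruits_list) := by unfold Pre_per_fruit_data; infer_instance

def pvWitness_per_fruit_data : List String × List Int × List String × List String × List Int × List String × List String :=
  (["apple", "pear", "apple"], [3, 4, 5], ["red", "green", "red"], ["round", "oval", "round"], [1, 2, 3], ["rr", "go", "rr"], ["apple", "pear"])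

def Spec_per_fruit_data (fruits_data : List String) (size_data : List Int) (color_data : List String) (shape_data : List String) (days_data : List Int) (color_shape : List String) (unique_fruits_list : List String) (out : (List (String × Int)) × (List (String × List String)) × (List (String × List String)) × (List (String × List Int)) × (List (String × List String))) : Prop := out = per_fruit_data_alt fruits_data size_data color_data shape_data days_data color_shape unique_fruits_list
instance (fruits_data : List String) (size_data : List Int) (color_data : List String) (shape_data : List String) (days_data : List Int) (color_shape : List String) (unique_fruits_list : List String) (out : (List (String × Int)) × (List (String × List String)) × (List (String × List String)) × (List (String × List Int)) × (List (String × List String))) : Decidable (Spec_per_fruit_data fruits_data size_data color_data shape_data days_data color_shape unique_fruits_list out) := by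
  unfold Spec_per_fruit_data
  letI d1 : DecidableEq (List (String × Int)) := inferInstance
  letI d2 : DecidableEq (List (String × List String)) := inferInstance
  letI d3 : DecidableEq (List (String × List Int)) := inferInstance
  infer_instance

-- ===== CLAIM (what is proved, stated in full; the proofs are below) =====
def Claim_equal_per_fruit_data : Prop := ∀ (fruits_data : List String) (size_data : List Int) (color_data : List String) (shape_data : List String) (days_data : List Int) (color_shape : List String) (unique_fruits_list : List String), Dom_per_fruit_data fruits_data size_data color_data shape_data days_data color_shape unique_fruits_list → Pre_per_fruit_data fruits_data size_data color_data shape_data days_data color_shape unique_fruits_list → Spec_per_fruit_data fruits_data size_data color_data shape_data days_data color_shape unique_fruits_list (per_fruit_data fruits_data size_data color_data shape_data days_data color_shape unique_fruits_list)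
-- ===== LEMMAS AND PROOFS =====

-- A's inner scan, rewritten over an arbitrary list of Nat indices.
theorem pvGatherFold (f : String) (fd : List String) (sd : List Int) (cd shd : List String) (dd : List Int) (cs : List String) (is : List Nat) :
    ∀ (acc : Int × List String × List String × List Int × List String),
    is.foldl
      (fun acc i =>
        if f == fd.getD i "" then
          (acc.1 + sd.getD i 0,
           acc.2.1 ++ [cd.getD i ""],
           acc.2.2.1 ++ [shd.getD i ""],
           acc.2.2.2.1 ++ [dd.getD i 0],
           acc.2.2.2.2 ++ [cs.getD i ""])
        else acc) acc
    = (acc.1 + (((is.filter (fun i => f == fd.getD i "")).map (fun i => sd.getD i 0)).sum),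
       acc.2.1 ++ (is.filter (fun i => f == fd.getD i "")).map (fun i => cd.getD i ""),
       acc.2.2.1 ++ (is.filter (fun i => f == fd.getD i "")).map (fun i => shd.getD i ""),
       acc.2.2.2.1 ++ (is.filter (fun i => f == fd.getD i "")).map (fun i => dd.getD i 0),
       acc.2.2.2.2 ++ (is.filter (fun i => f == fd.getD i "")).map (fun i => cs.getD i "")) := by
  induction is with
  | nil => intro acc; simp
  | cons i t ih =>
    intro acc
    rw [List.foldl_cons, List.filter_cons]
    by_cases h : (f == fd.getD i "") = true
    · rw [if_pos h, if_pos h, ih]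
      obtain ⟨a1, a2, a3, a4, a5⟩ := acc
      simp [add_assoc]
    · rw [if_neg h, if_neg h, ih]

-- A's inner scan as (sum over / maps over) the matching indices.
theorem pvAGather_eq (f : String) (fd : List String) (sd : List Int) (cd shd : List String) (dd : List Int) (cs : List String) :
    pvAGather fd sd cd shd dd cs f
    = ((((List.range fd.length).filter (fun i => f == fd.getD i "")).map (fun i => sd.getD i 0)).sum,
       ((List.range fd.length).filter (fun i => f == fd.getD i "")).map (fun i => cd.getD i ""),
       ((List.range fd.length).filter (fun i => f == fd.getD i "")).map (fun i => shd.getD i ""),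
       ((List.range fd.length).filter (fun i => f == fd.getD i "")).map (fun i => dd.getD i 0),
       ((List.range fd.length).filter (fun i => f == fd.getD i "")).map (fun i => cs.getD i "")) := by
  unfold pvAGather
  rw [show PySem.List.len fd = ((fd.length : Nat) : Int) from rfl, PySem.List.pyRange_zero_natCast,
    List.foldl_map]
  simp only [PySem.List.pyGetD_natCast]
  rw [pvGatherFold]
  simp

-- The matching indices, pushed through the row builder, are exactly B's matching zipped rows.
theorem pvRowsBridge (f : String) (fd : List String) :
    ∀ (sd : List Int) (cd shd : List String) (dd : List Int),
    (∀ i, i < fd.length → fd.getD i "" = f → i < sd.length ∧ i < cd.length ∧ i < shd.length ∧ i < dd.length) →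
    ((List.range fd.length).filter (fun i => f == fd.getD i "")).map
        (fun i => (fd.getD i "", sd.getD i 0, cd.getD i "", shd.getD i "", dd.getD i 0))
      = (fd.zip (sd.zip (cd.zip (shd.zip dd)))).filter (fun r => f == r.1) := by
  induction fd with
  | nil => intro sd cd shd dd _; simp
  | cons a fd ih =>
    intro sd cd shd dd h
    cases sd with
    | nil =>
      have hf : List.filter (fun i => f == (a :: fd).getD i "") (List.range (a :: fd).length) = [] := by
        refine List.filter_eq_nil_iff.mpr ?_
        intro i hi hc
        have hb := h i (List.mem_range.mp hi) ((beq_iff_eq.mp hc).symm)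
        simp at hb
      rw [hf]; simp
    | cons s sd =>
      cases cd with
      | nil =>
        have hf : List.filter (fun i => f == (a :: fd).getD i "") (List.range (a :: fd).length) = [] := by
          refine List.filter_eq_nil_iff.mpr ?_
          intro i hi hc
          have hb := h i (List.mem_range.mp hi) ((beq_iff_eq.mp hc).symm)
          simp at hb
        rw [hf]; simp
      | cons c cd =>
        cases shd with
        | nil =>
          have hf : List.filter (fun i => f == (a :: fd).getD i "") (List.range (a :: fd).length) = [] := by
            refine List.filter_eq_nil_iff.mpr ?_
            intro i hi hc
            have hb := h i (List.mem_range.mp hi) ((beq_iff_eq.mp hc).symm)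
            simp at hb
          rw [hf]; simp
        | cons sh shd =>
          cases dd with
          | nil =>
            have hf : List.filter (fun i => f == (a :: fd).getD i "") (List.range (a :: fd).length) = [] := by
              refine List.filter_eq_nil_iff.mpr ?_
              intro i hi hc
              have hb := h i (List.mem_range.mp hi) ((beq_iff_eq.mp hc).symm)
              simp at hb
            rw [hf]; simp
          | cons dv dd =>
            have h' : ∀ i, i < fd.length → fd.getD i "" = f → i < sd.length ∧ i < cd.length ∧ i < shd.length ∧ i < dd.length := by
              intro i hi he
              have hb := h (i + 1) (by simpa using Nat.succ_lt_succ hi) (by simpa using he)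
              simp at hb
              omega
            have tail := ih sd cd shd dd h'
            simp only [List.length_cons, List.range_succ_eq_map, List.filter_cons, List.filter_map,
              List.zip_cons_cons]
            by_cases hfa : (f == a) = true
            · simp only [List.getD_cons_zero, hfa, if_pos, List.map_cons]
              congr 1
              simpa [Function.comp_def, Nat.succ_eq_add_one] using tail
            · simp only [List.getD_cons_zero, hfa]
              simp only [Bool.false_eq_true, if_false]
              simpa [Function.comp_def, Nat.succ_eq_add_one, hfa] using tail

-- B's summing grouping pass, looked up at one key.
theorem pvGetDAdd {α : Type} (l : List α) (key : α → String) (g : α → Int) (c : String) :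
    ∀ (d : PySem.Dict String Int),
    (l.foldl (fun d x => d.modify (key x) 0 (fun v => v + g x)) d).getD c 0
      = d.getD c 0 + ((l.filter (fun x => c == key x)).map g).sum := by
  induction l with
  | nil => intro d; simp
  | cons a t ih =>
    intro d
    simp only [List.foldl_cons, List.filter_cons, ih]
    rw [PySem.Dict.getD_modify]
    by_cases hc : c = key a
    · simp [hc, add_assoc]
    · have : (c == key a) = false := by simpa using hc
      simp [hc, this]

-- B's list-collecting grouping pass, looked up at one key.
theorem pvGetDAppend {α β : Type} (l : List α) (key : α → String) (g : α → β) (c : String) :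
    ∀ (d : PySem.Dict String (List β)),
    (l.foldl (fun d x => d.modify (key x) [] (fun v => v ++ [g x])) d).getD c []
      = d.getD c [] ++ (l.filter (fun x => c == key x)).map g := by
  induction l with
  | nil => intro d; simp
  | cons a t ih =>
    intro d
    simp only [List.foldl_cons, List.filter_cons, ih]
    rw [PySem.Dict.getD_modify]
    by_cases hc : c = key a
    · simp [hc]
    · have : (c == key a) = false := by simpa using hc
      simp [hc, this]

-- per-key agreement: A's gathered values for a fruit of unique_fruits_list are B's grouped lookups
theorem pvKey (fd : List String) (sd : List Int) (cd shd : List String) (dd : List Int) (cs : List String) (uq : List String)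
    (hpre : Pre_per_fruit_data fd sd cd shd dd cs uq) (fruit : String) (hm : fruit ∈ uq) :
    (pvAGather fd sd cd shd dd cs fruit).1
        = ((fd.zip (sd.zip (cd.zip (shd.zip dd)))).foldl (fun d r => d.modify r.1 0 (fun v => v + r.2.1)) PySem.Dict.empty).getD fruit 0
    ∧ (pvAGather fd sd cd shd dd cs fruit).2.1
        = ((fd.zip (sd.zip (cd.zip (shd.zip dd)))).foldl (fun d r => d.modify r.1 [] (fun v => v ++ [r.2.2.1])) PySem.Dict.empty).getD fruit []
    ∧ (pvAGather fd sd cd shd dd cs fruit).2.2.1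
        = ((fd.zip (sd.zip (cd.zip (shd.zip dd)))).foldl (fun d r => d.modify r.1 [] (fun v => v ++ [r.2.2.2.1])) PySem.Dict.empty).getD fruit []
    ∧ (pvAGather fd sd cd shd dd cs fruit).2.2.2.1
        = ((fd.zip (sd.zip (cd.zip (shd.zip dd)))).foldl (fun d r => d.modify r.1 [] (fun v => v ++ [r.2.2.2.2])) PySem.Dict.empty).getD fruit [] := by
  have hb : ∀ i, i < fd.length → fd.getD i "" = fruit → i < sd.length ∧ i < cd.length ∧ i < shd.length ∧ i < dd.length := by
    intro i hi he
    have h5 := hpre i hi (by rw [he]; exact hm)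
    exact ⟨h5.1, h5.2.1, h5.2.2.1, h5.2.2.2.1⟩
  have hbridge := pvRowsBridge fruit fd sd cd shd dd hb
  rw [pvAGather_eq]
  refine ⟨?_, ?_, ?_, ?_⟩
  · rw [pvGetDAdd (fd.zip (sd.zip (cd.zip (shd.zip dd)))) (fun r => r.1) (fun r => r.2.1) fruit PySem.Dict.empty,
      ← hbridge, List.map_map]
    simp [Function.comp_def]
  · rw [pvGetDAppend (fd.zip (sd.zip (cd.zip (shd.zip dd)))) (fun r => r.1) (fun r => r.2.2.1) fruit PySem.Dict.empty,
      ← hbridge, List.map_map]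
    simp [Function.comp_def]
  · rw [pvGetDAppend (fd.zip (sd.zip (cd.zip (shd.zip dd)))) (fun r => r.1) (fun r => r.2.2.2.1) fruit PySem.Dict.empty,
      ← hbridge, List.map_map]
    simp [Function.comp_def]
  · rw [pvGetDAppend (fd.zip (sd.zip (cd.zip (shd.zip dd)))) (fun r => r.1) (fun r => r.2.2.2.2) fruit PySem.Dict.empty,
      ← hbridge, List.map_map]
    simp [Function.comp_def]

-- ===== VERDICT (by name: the statement is the Claim_ definition above) =====
theorem per_fruit_data_spec : Claim_equal_per_fruit_data := by
  intro fd sd cd shd dd cs uq _hdom hpre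
  simp only [Spec_per_fruit_data, per_fruit_data, per_fruit_data_alt]
  -- split A's five-dict loop into five loops
  rw [PySem.List.foldl_prod_mk
        (f := fun (d : PySem.Dict String Int) fruit => d.insert fruit (pvAGather fd sd cd shd dd cs fruit).1)
        (g := fun (st : PySem.Dict String (List String) × PySem.Dict String (List String) × PySem.Dict String (List Int) × PySem.Dict String (List String)) fruit =>
          (st.1.insert fruit (pvAGather fd sd cd shd dd cs fruit).2.1,
           st.2.1.insert fruit (pvAGather fd sd cd shd dd cs fruit).2.2.1,
           st.2.2.1.insert fruit (pvAGather fd sd cd shd dd cs fruit).2.2.2.1,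
           st.2.2.2.insert fruit cs))]
  rw [PySem.List.foldl_prod_mk
        (f := fun (d : PySem.Dict String (List String)) fruit => d.insert fruit (pvAGather fd sd cd shd dd cs fruit).2.1)
        (g := fun (st : PySem.Dict String (List String) × PySem.Dict String (List Int) × PySem.Dict String (List String)) fruit =>
          (st.1.insert fruit (pvAGather fd sd cd shd dd cs fruit).2.2.1,
           st.2.1.insert fruit (pvAGather fd sd cd shd dd cs fruit).2.2.2.1,
           st.2.2.insert fruit cs))]
  rw [PySem.List.foldl_prod_mk
        (f := fun (d : PySem.Dict String (List String)) fruit => d.insert fruit (pvAGather fd sd cd shd dd cs fruit).2.2.1)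
        (g := fun (st : PySem.Dict String (List Int) × PySem.Dict String (List String)) fruit =>
          (st.1.insert fruit (pvAGather fd sd cd shd dd cs fruit).2.2.2.1,
           st.2.insert fruit cs))]
  rw [PySem.List.foldl_prod_mk
        (f := fun (d : PySem.Dict String (List Int)) fruit => d.insert fruit (pvAGather fd sd cd shd dd cs fruit).2.2.2.1)
        (g := fun (d : PySem.Dict String (List String)) fruit => d.insert fruit cs)]
  -- split B's four-dict grouping loop into four loops
  have hBsplit : (fd.zip (sd.zip (cd.zip (shd.zip dd)))).foldl
      (fun (g : PySem.Dict String Int × PySem.Dict String (List String) × PySem.Dict String (List String) × PySem.Dict String (List Int)) r =>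
        (g.1.modify r.1 0 (fun v => v + r.2.1),
         g.2.1.modify r.1 [] (fun v => v ++ [r.2.2.1]),
         g.2.2.1.modify r.1 [] (fun v => v ++ [r.2.2.2.1]),
         g.2.2.2.modify r.1 [] (fun v => v ++ [r.2.2.2.2])))
      (PySem.Dict.empty, PySem.Dict.empty, PySem.Dict.empty, PySem.Dict.empty)
      = ((fd.zip (sd.zip (cd.zip (shd.zip dd)))).foldl (fun d r => d.modify r.1 0 (fun v => v + r.2.1)) PySem.Dict.empty, (fd.zip (sd.zip (cd.zip (shd.zip dd)))).foldl (fun d r => d.modify r.1 [] (fun v => v ++ [r.2.2.1])) PySem.Dict.empty, (fd.zip (sd.zip (cd.zip (shd.zip dd)))).foldl (fun d r => d.modify r.1 [] (fun v => v ++ [r.2.2.2.1])) PySem.Dict.empty, (fd.zip (sd.zip (cd.zip (shd.zip dd)))).foldl (fun d r => d.modify r.1 [] (fun v => v ++ [r.2.2.2.2])) PySem.Dict.empty) := by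
    rw [show (fd.zip (sd.zip (cd.zip (shd.zip dd)))).foldl
      (fun (g : PySem.Dict String Int × PySem.Dict String (List String) × PySem.Dict String (List String) × PySem.Dict String (List Int)) r =>
        (g.1.modify r.1 0 (fun v => v + r.2.1),
         g.2.1.modify r.1 [] (fun v => v ++ [r.2.2.1]),
         g.2.2.1.modify r.1 [] (fun v => v ++ [r.2.2.2.1]),
         g.2.2.2.modify r.1 [] (fun v => v ++ [r.2.2.2.2])))
      (PySem.Dict.empty, PySem.Dict.empty, PySem.Dict.empty, PySem.Dict.empty) = ((fd.zip (sd.zip (cd.zip (shd.zip dd)))).foldl (fun d r => d.modify r.1 0 (fun v => v + r.2.1)) PySem.Dict.empty, (fd.zip (sd.zip (cd.zip (shd.zip dd)))).foldl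
      (fun (g : PySem.Dict String (List String) × PySem.Dict String (List String) × PySem.Dict String (List Int)) r =>
        (g.1.modify r.1 [] (fun v => v ++ [r.2.2.1]),
         g.2.1.modify r.1 [] (fun v => v ++ [r.2.2.2.1]),
         g.2.2.modify r.1 [] (fun v => v ++ [r.2.2.2.2])))
      (PySem.Dict.empty, PySem.Dict.empty, PySem.Dict.empty)) from PySem.List.foldl_prod_mk (fun (d : PySem.Dict String Int) (r : String × Int × String × String × Int) => d.modify r.1 0 (fun v => v + r.2.1)) (fun (g : PySem.Dict String (List String) × PySem.Dict String (List String) × PySem.Dict String (List Int)) (r : String × Int × String × String × Int) => (g.1.modify r.1 [] (fun v => v ++ [r.2.2.1]), g.2.1.modify r.1 [] (fun v => v ++ [r.2.2.2.1]), g.2.2.modify r.1 [] (fun v => v ++ [r.2.2.2.2]))) _ _ _,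
        show (fd.zip (sd.zip (cd.zip (shd.zip dd)))).foldl
      (fun (g : PySem.Dict String (List String) × PySem.Dict String (List String) × PySem.Dict String (List Int)) r =>
        (g.1.modify r.1 [] (fun v => v ++ [r.2.2.1]),
         g.2.1.modify r.1 [] (fun v => v ++ [r.2.2.2.1]),
         g.2.2.modify r.1 [] (fun v => v ++ [r.2.2.2.2])))
      (PySem.Dict.empty, PySem.Dict.empty, PySem.Dict.empty) = ((fd.zip (sd.zip (cd.zip (shd.zip dd)))).foldl (fun d r => d.modify r.1 [] (fun v => v ++ [r.2.2.1])) PySem.Dict.empty, (fd.zip (sd.zip (cd.zip (shd.zip dd)))).foldl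
      (fun (g : PySem.Dict String (List String) × PySem.Dict String (List Int)) r =>
        (g.1.modify r.1 [] (fun v => v ++ [r.2.2.2.1]),
         g.2.modify r.1 [] (fun v => v ++ [r.2.2.2.2])))
      (PySem.Dict.empty, PySem.Dict.empty)) from PySem.List.foldl_prod_mk (fun (d : PySem.Dict String (List String)) (r : String × Int × String × String × Int) => d.modify r.1 [] (fun v => v ++ [r.2.2.1])) (fun (g : PySem.Dict String (List String) × PySem.Dict String (List Int)) (r : String × Int × String × String × Int) => (g.1.modify r.1 [] (fun v => v ++ [r.2.2.2.1]), g.2.modify r.1 [] (fun v => v ++ [r.2.2.2.2]))) _ _ _,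
        show (fd.zip (sd.zip (cd.zip (shd.zip dd)))).foldl
      (fun (g : PySem.Dict String (List String) × PySem.Dict String (List Int)) r =>
        (g.1.modify r.1 [] (fun v => v ++ [r.2.2.2.1]),
         g.2.modify r.1 [] (fun v => v ++ [r.2.2.2.2])))
      (PySem.Dict.empty, PySem.Dict.empty) = ((fd.zip (sd.zip (cd.zip (shd.zip dd)))).foldl (fun d r => d.modify r.1 [] (fun v => v ++ [r.2.2.2.1])) PySem.Dict.empty, (fd.zip (sd.zip (cd.zip (shd.zip dd)))).foldl (fun d r => d.modify r.1 [] (fun v => v ++ [r.2.2.2.2])) PySem.Dict.empty) from PySem.List.foldl_prod_mk (fun (d : PySem.Dict String (List String)) (r : String × Int × String × String × Int) => d.modify r.1 [] (fun v => v ++ [r.2.2.2.1])) (fun (d : PySem.Dict String (List Int)) (r : String × Int × String × String × Int) => d.modify r.1 [] (fun v => v ++ [r.2.2.2.2])) _ _ _]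
  rw [hBsplit]
  dsimp only
  -- the five emitted dicts agree key by key
  have e1 : uq.foldl (fun (d : PySem.Dict String Int) fruit => d.insert fruit (pvAGather fd sd cd shd dd cs fruit).1) PySem.Dict.empty
      = uq.foldl (fun d fruit => d.insert fruit (((fd.zip (sd.zip (cd.zip (shd.zip dd)))).foldl (fun d r => d.modify r.1 0 (fun v => v + r.2.1)) PySem.Dict.empty).getD fruit 0)) PySem.Dict.empty :=
    PySem.List.foldl_congr_mem _ _ _ _ (fun acc x hx => by rw [(pvKey fd sd cd shd dd cs uq hpre x hx).1])
  have e2 : uq.foldl (fun (d : PySem.Dict String (List String)) fruit => d.insert fruit (pvAGather fd sd cd shd dd cs fruit).2.1) PySem.Dict.empty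
      = uq.foldl (fun d fruit => d.insert fruit (((fd.zip (sd.zip (cd.zip (shd.zip dd)))).foldl (fun d r => d.modify r.1 [] (fun v => v ++ [r.2.2.1])) PySem.Dict.empty).getD fruit [])) PySem.Dict.empty :=
    PySem.List.foldl_congr_mem _ _ _ _ (fun acc x hx => by rw [(pvKey fd sd cd shd dd cs uq hpre x hx).2.1])
  have e3 : uq.foldl (fun (d : PySem.Dict String (List String)) fruit => d.insert fruit (pvAGather fd sd cd shd dd cs fruit).2.2.1) PySem.Dict.empty
      = uq.foldl (fun d fruit => d.insert fruit (((fd.zip (sd.zip (cd.zip (shd.zip dd)))).foldl (fun d r => d.modify r.1 [] (fun v => v ++ [r.2.2.2.1])) PySem.Dict.empty).getD fruit [])) PySem.Dict.empty :=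
    PySem.List.foldl_congr_mem _ _ _ _ (fun acc x hx => by rw [(pvKey fd sd cd shd dd cs uq hpre x hx).2.2.1])
  have e4 : uq.foldl (fun (d : PySem.Dict String (List Int)) fruit => d.insert fruit (pvAGather fd sd cd shd dd cs fruit).2.2.2.1) PySem.Dict.empty
      = uq.foldl (fun d fruit => d.insert fruit (((fd.zip (sd.zip (cd.zip (shd.zip dd)))).foldl (fun d r => d.modify r.1 [] (fun v => v ++ [r.2.2.2.2])) PySem.Dict.empty).getD fruit [])) PySem.Dict.empty :=
    PySem.List.foldl_congr_mem _ _ _ _ (fun acc x hx => by rw [(pvKey fd sd cd shd dd cs uq hpre x hx).2.2.2])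
  rw [e1, e2, e3, e4]
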